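-- pv_equiv track=rewrite | github.com/ghoshorn/leetcode | leet179.py | compare1
-- ===== SOURCE A (Python) =====
-- def compare1(a, b): # wrong
--     la=len(a)
--     lb=len(b)
--     i=j=0
--     while i<la and j<lb:
--         if a[i]>b[j]:
--             return 1
--         elif a[i]<b[j]:
--             return -1
--         i+=1
--         j+=1
--     if i<la:
--         while i<la:
--             if a[i]>b[0]:
--                 return 1
--             elif a[i]<b[0]:
--                 return -1
--             i+=1
--         return -1
--     if j<lb:
--         while j<lb:
--             if a[0]>b[j]:
--                 return 1
--             elif a[0]<b[j]:
--                 return -1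
--             j+=1
--         return 1
--     return 0
-- ===== SOURCE B (Python) =====
-- def compare1(a, b):
--     la = len(a)
--     lb = len(b)
--     if la > lb:
--         y = b + b[0] * (la - lb)
--         return 1 if a > y else -1
--     if lb > la:
--         x = a + a[0] * (lb - la)
--         return -1 if x < b else 1
--     return (a > b) - (a < b)
-- ===== Notes on version B (the rewrite author's own statement) =====
-- stated objective: simpler
-- what changed: Replaces A's three hand-rolled index loops with one step: pad the shorter string with its own first character to equal length and let built-in lexicographic string comparison decide the sign; the interpreted per-character loop becomes one C-level comparison.
import Mathlib
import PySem

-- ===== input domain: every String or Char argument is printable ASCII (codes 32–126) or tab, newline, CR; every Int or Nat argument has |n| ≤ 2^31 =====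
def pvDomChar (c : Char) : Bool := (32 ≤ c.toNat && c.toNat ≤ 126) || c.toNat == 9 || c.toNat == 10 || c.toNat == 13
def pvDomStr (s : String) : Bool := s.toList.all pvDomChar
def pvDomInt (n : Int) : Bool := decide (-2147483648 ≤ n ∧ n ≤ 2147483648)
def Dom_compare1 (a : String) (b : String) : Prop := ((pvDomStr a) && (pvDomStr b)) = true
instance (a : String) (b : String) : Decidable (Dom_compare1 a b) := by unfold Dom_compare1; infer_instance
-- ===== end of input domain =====

-- B replaces A's three index loops by padding the shorter string with its first character and
-- one built-in lexicographic comparison (objective: simpler); return values agree on all of Pre_.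

-- ===== PORT A =====
-- second while loop of A: remaining characters of a against b[0]; falls through to -1
def compare1TailA (b0 : Char) : List Char → Int
  | [] => -1
  | c :: rest => if c > b0 then 1 else if c < b0 then -1 else compare1TailA b0 rest

-- third while loop of A: a[0] against remaining characters of b; falls through to 1
def compare1TailB (a0 : Char) : List Char → Int
  | [] => 1
  | c :: rest => if a0 > c then 1 else if a0 < c then -1 else compare1TailB a0 rest

-- first while loop of A (i,j advance together), then the i<la / j<lb / return 0 branches
def compare1Main (a0 b0 : Char) : List Char → List Char → Int
  | x :: xs, y :: ys => if x > y then 1 else if x < y then -1 else compare1Main a0 b0 xs ys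
  | [], [] => 0
  | xs@(_ :: _), [] => compare1TailA b0 xs
  | [], ys@(_ :: _) => compare1TailB a0 ys

def compare1 (a : String) (b : String) : Int :=
  -- a[0]/b[0] are read only when the corresponding string is nonempty under Pre_;
  -- on an empty string Python raises IndexError there (excluded by Pre_), headD is a placeholder
  compare1Main (a.toList.headD ' ') (b.toList.headD ' ') a.toList b.toList

-- ===== PORT B =====
-- hand port of Python's built-in string '<' (exact lexicographic code-point comparison on the ASCII domain)
def pyStrLt : List Char → List Char → Bool
  | _, [] => false
  | [], _ :: _ => true
  | x :: xs, y :: ys => x < y || (x == y && pyStrLt xs ys)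

def compare1_alt (a : String) (b : String) : Int :=
  let xs := a.toList
  let ys := b.toList
  if xs.length > ys.length then
    -- y = b + b[0]*(la-lb); b[0] raises for empty b in Python (excluded by Pre_), headD is a placeholder
    let y := ys ++ List.replicate (xs.length - ys.length) (ys.headD ' ')
    if pyStrLt y xs then 1 else -1
  else if ys.length > xs.length then
    let x := xs ++ List.replicate (ys.length - xs.length) (xs.headD ' ')
    if pyStrLt x ys then -1 else 1
  else
    (if pyStrLt ys xs then (1 : Int) else 0) - (if pyStrLt xs ys then 1 else 0)

-- ===== PRECONDITION & SPEC =====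
-- Pre_ excludes exactly the inputs where one string is empty and the other is not: there
-- Python A raises IndexError (b[0] resp. a[0]); Python B raises IndexError there as well.
def Pre_compare1 (a : String) (b : String) : Prop := (a.toList = [] ↔ b.toList = [])
instance (a : String) (b : String) : Decidable (Pre_compare1 a b) := by unfold Pre_compare1; infer_instance
def pvWitness_compare1 : String × String := ("gza", "gb")

def Spec_compare1 (a : String) (b : String) (out : Int) : Prop := out = compare1_alt a b
instance (a : String) (b : String) (out : Int) : Decidable (Spec_compare1 a b out) := by unfold Spec_compare1; infer_instance

-- ===== CLAIM (what is proved, stated in full; the proofs are below) =====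
def Claim_equal_compare1 : Prop := ∀ (a : String) (b : String), Dom_compare1 a b → Pre_compare1 a b → Spec_compare1 a b (compare1 a b)

-- ===== LEMMAS AND PROOFS =====

theorem char_eq_of_not_lt {x y : Char} (h1 : ¬ x < y) (h2 : ¬ y < x) : x = y :=
  le_antisymm (not_lt.mp h2) (not_lt.mp h1)

theorem char_beq_false_of_lt {x y : Char} (h : x < y) : (x == y) = false :=
  beq_eq_false_iff_ne.mpr (ne_of_lt h)

theorem char_beq_false_of_gt {x y : Char} (h : y < x) : (x == y) = false :=
  beq_eq_false_iff_ne.mpr (ne_of_gt h)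

theorem tailA_eq (b0 : Char) (xs : List Char) :
    compare1TailA b0 xs = if pyStrLt (List.replicate xs.length b0) xs then 1 else -1 := by
  induction xs with
  | nil => simp [compare1TailA, pyStrLt]
  | cons c rest ih =>
    by_cases h1 : b0 < c
    · simp [compare1TailA, pyStrLt, List.replicate_succ, h1, not_lt_of_gt h1]
    · by_cases h2 : c < b0
      · simp [compare1TailA, pyStrLt, List.replicate_succ, h1, h2, char_beq_false_of_gt h2]
      · have : b0 = c := char_eq_of_not_lt h1 h2
        subst this
        simp [compare1TailA, pyStrLt, List.replicate_succ, h1, h2, ih]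

theorem tailB_eq (a0 : Char) (ys : List Char) :
    compare1TailB a0 ys = if pyStrLt (List.replicate ys.length a0) ys then -1 else 1 := by
  induction ys with
  | nil => simp [compare1TailB, pyStrLt]
  | cons c rest ih =>
    by_cases h1 : c < a0
    · simp [compare1TailB, pyStrLt, List.replicate_succ, h1, not_lt_of_gt h1, char_beq_false_of_gt h1]
    · by_cases h2 : a0 < c
      · simp [compare1TailB, pyStrLt, List.replicate_succ, h1, h2]
      · have : a0 = c := char_eq_of_not_lt h2 h1
        subst this
        simp [compare1TailB, pyStrLt, List.replicate_succ, h1, h2, ih]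

theorem main_eq_len (a0 b0 : Char) (xs : List Char) :
    ∀ ys : List Char, xs.length = ys.length →
      compare1Main a0 b0 xs ys =
        (if pyStrLt ys xs then (1 : Int) else 0) - (if pyStrLt xs ys then 1 else 0) := by
  induction xs with
  | nil => intro ys h; cases ys with
    | nil => simp [compare1Main, pyStrLt]
    | cons y ys => simp at h
  | cons x xs ih =>
    intro ys h
    cases ys with
    | nil => simp at h
    | cons y ys =>
      simp only [List.length_cons, Nat.add_right_cancel_iff] at h
      by_cases h1 : y < x
      · simp [compare1Main, pyStrLt, h1, not_lt_of_gt h1, char_beq_false_of_gt h1,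
          char_beq_false_of_lt h1]
      · by_cases h2 : x < y
        · simp [compare1Main, pyStrLt, h1, h2, char_beq_false_of_lt h2, char_beq_false_of_gt h2]
        · have : x = y := char_eq_of_not_lt h2 h1
          subst this
          simp [compare1Main, pyStrLt, h1, h2, ih ys h]

theorem main_eq_gt (a0 b0 : Char) (ys : List Char) :
    ∀ xs : List Char, ys.length < xs.length →
      compare1Main a0 b0 xs ys =
        if pyStrLt (ys ++ List.replicate (xs.length - ys.length) b0) xs then 1 else -1 := by
  induction ys with
  | nil =>
    intro xs h
    cases xs with
    | nil => simp at h
    | cons x xs => simpa [compare1Main] using tailA_eq b0 (x :: xs)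
  | cons y ys ih =>
    intro xs h
    cases xs with
    | nil => simp at h
    | cons x xs =>
      simp only [List.length_cons, Nat.add_lt_add_iff_right] at h
      by_cases h1 : y < x
      · simp [compare1Main, pyStrLt, h1, not_lt_of_gt h1]
      · by_cases h2 : x < y
        · simp [compare1Main, pyStrLt, h1, h2, char_beq_false_of_gt (x := y) (y := x) h2]
        · have : x = y := char_eq_of_not_lt h2 h1
          subst this
          have hlen : (x :: xs).length - (x :: ys).length = xs.length - ys.length := by
            simp
          simp [compare1Main, pyStrLt, h1, h2, hlen, ih xs h]

theorem main_eq_lt (a0 b0 : Char) (xs : List Char) :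
    ∀ ys : List Char, xs.length < ys.length →
      compare1Main a0 b0 xs ys =
        if pyStrLt (xs ++ List.replicate (ys.length - xs.length) a0) ys then -1 else 1 := by
  induction xs with
  | nil =>
    intro ys h
    cases ys with
    | nil => simp at h
    | cons y ys => simpa [compare1Main] using tailB_eq a0 (y :: ys)
  | cons x xs ih =>
    intro ys h
    cases ys with
    | nil => simp at h
    | cons y ys =>
      simp only [List.length_cons, Nat.add_lt_add_iff_right] at h
      by_cases h1 : y < x
      · simp [compare1Main, pyStrLt, h1, not_lt_of_gt h1, char_beq_false_of_gt h1]
      · by_cases h2 : x < y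
        · simp [compare1Main, pyStrLt, h1, h2]
        · have : x = y := char_eq_of_not_lt h2 h1
          subst this
          have hlen : (x :: ys).length - (x :: xs).length = ys.length - xs.length := by
            simp
          simp [compare1Main, pyStrLt, h1, h2, hlen, ih ys h]

-- ===== VERDICT (by name: the statement is the Claim_ definition above) =====
theorem compare1_spec : Claim_equal_compare1 := by
  intro a b _ hpre
  unfold Spec_compare1 compare1 compare1_alt
  unfold Pre_compare1 at hpre
  cases hx : a.toList with
  | nil =>
    have hy : b.toList = [] := hpre.1 hx
    simp [hy, compare1Main, pyStrLt]
  | cons x xs =>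
    cases hy : b.toList with
    | nil => exact absurd (hpre.2 hy) (by simp [hx])
    | cons y ys =>
      simp only [hx, hy, List.headD_cons]
      rcases lt_trichotomy xs.length ys.length with h | h | h
      · simpa [h, Nat.lt_asymm h] using
          main_eq_lt x y (x :: xs) (y :: ys) (by simpa using h)
      · simpa [h, lt_irrefl] using main_eq_len x y (x :: xs) (y :: ys) (by simpa using h)
      · simpa [h, Nat.lt_asymm h] using
          main_eq_gt x y (y :: ys) (x :: xs) (by simpa using h)
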